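-- pv_equiv track=rewrite | github.com/Manoe2006/ann-e-sco-2022-2023 | devoir_maison_nsi.py/projetvrai2.py | est_triangle_rectangle
-- ===== SOURCE A (Python) =====
-- def est_triangle_rectangle(points):
--     """Vérifie si les trois points donnés forment un triangle rectangle."""
--
--     if len(set(tuple(pt) for pt in points)) != 3:
--         return False  # Ignorer les triangles avec des points confondus
--
--     def distance(pt1, pt2):
--         return ((pt1[0] - pt2[0])**2 + (pt1[1] - pt2[1])**2)
--
--     cotes = [distance(points[0], points[1]), distance(points[1], points[2]), distance(points[0], points[2])]
--     cotes.sort()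
--
--     if cotes[0] + cotes[1] == cotes[2]:
--         return True
--     else:
--         return False
-- ===== SOURCE B (Python) =====
-- def est_triangle_rectangle(points):
--     """Vérifie si les trois points donnés forment un triangle rectangle."""
--     if len(set(tuple(pt) for pt in points)) != 3:
--         return False  # points confondus
--     # right angle iff at some vertex i the two edge vectors are perpendicular
--     for i, j, k in ((0, 1, 2), (1, 0, 2), (2, 0, 1)):
--         vx = points[j][0] - points[i][0]
--         vy = points[j][1] - points[i][1]
--         wx = points[k][0] - points[i][0]
--         wy = points[k][1] - points[i][1]
--         if vx * wx + vy * wy == 0: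
--             return True
--     return False
-- ===== Notes on version B (the rewrite author's own statement) =====
-- stated objective: alternative
-- what changed: Replaces the build-three-squared-distances, sort, and Pythagorean-sum check with a perpendicularity test: at each vertex compute the two edge vectors and test whether their dot product is zero.
import Mathlib
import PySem

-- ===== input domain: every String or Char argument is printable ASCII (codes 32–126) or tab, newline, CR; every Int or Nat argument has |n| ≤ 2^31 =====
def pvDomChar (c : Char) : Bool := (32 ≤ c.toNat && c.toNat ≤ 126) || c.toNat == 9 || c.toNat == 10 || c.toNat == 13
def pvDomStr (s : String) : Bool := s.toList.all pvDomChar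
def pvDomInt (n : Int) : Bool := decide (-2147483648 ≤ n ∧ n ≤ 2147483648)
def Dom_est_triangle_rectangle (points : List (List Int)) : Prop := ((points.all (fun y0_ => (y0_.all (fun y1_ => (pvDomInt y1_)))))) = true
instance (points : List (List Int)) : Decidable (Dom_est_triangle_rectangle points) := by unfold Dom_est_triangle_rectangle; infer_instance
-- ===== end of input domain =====

-- B replaces A's sort-the-squared-distances Pythagorean check with a per-vertex dot-product
-- (perpendicularity) test on the edge vectors; same value on all admitted inputs (exact integer arithmetic).

-- ===== PORT A =====
def pvDist (pt1 pt2 : List Int) : Int :=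
  (PySem.List.pyGetD pt1 0 0 - PySem.List.pyGetD pt2 0 0) ^ 2
    + (PySem.List.pyGetD pt1 1 0 - PySem.List.pyGetD pt2 1 0) ^ 2

def est_triangle_rectangle (points : List (List Int)) : Bool :=
  if (PySem.Set.ofList points).length ≠ 3 then false
  else
    let p0 := PySem.List.pyGetD points 0 []
    let p1 := PySem.List.pyGetD points 1 []
    let p2 := PySem.List.pyGetD points 2 []
    let cotes := PySem.List.sorted [pvDist p0 p1, pvDist p1 p2, pvDist p0 p2] (fun x => x) false
    if PySem.List.pyGetD cotes 0 0 + PySem.List.pyGetD cotes 1 0 = PySem.List.pyGetD cotes 2 0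
    then true else false

-- ===== PORT B =====
-- dot product of the two edge vectors at vertex i (toward vertices j and k)
def pvDotAt (points : List (List Int)) (i j k : Int) : Int :=
  let pi := PySem.List.pyGetD points i []
  let pj := PySem.List.pyGetD points j []
  let pk := PySem.List.pyGetD points k []
  (PySem.List.pyGetD pj 0 0 - PySem.List.pyGetD pi 0 0) * (PySem.List.pyGetD pk 0 0 - PySem.List.pyGetD pi 0 0)
    + (PySem.List.pyGetD pj 1 0 - PySem.List.pyGetD pi 1 0) * (PySem.List.pyGetD pk 1 0 - PySem.List.pyGetD pi 1 0)

def est_triangle_rectangle_alt (points : List (List Int)) : Bool :=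
  if (PySem.Set.ofList points).length ≠ 3 then false
  else
    [((0 : Int), (1 : Int), (2 : Int)), (1, 0, 2), (2, 0, 1)].any
      (fun t => pvDotAt points t.1 t.2.1 t.2.2 == 0)

-- ===== PRECONDITION & SPEC =====
-- Pre_ excludes exactly the inputs where A raises IndexError: the distinct-point guard passes
-- but one of the first three points has fewer than two coordinates.
def Pre_est_triangle_rectangle (points : List (List Int)) : Prop :=
  (PySem.Set.ofList points).length = 3 →
    2 ≤ (points.getD 0 []).length ∧ 2 ≤ (points.getD 1 []).length ∧ 2 ≤ (points.getD 2 []).length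
instance (points : List (List Int)) : Decidable (Pre_est_triangle_rectangle points) := by
  unfold Pre_est_triangle_rectangle; infer_instance

def pvWitness_est_triangle_rectangle : List (List Int) := [[0, 0], [1, 0], [0, 1]]

def Spec_est_triangle_rectangle (points : List (List Int)) (out : Bool) : Prop := out = est_triangle_rectangle_alt points
instance (points : List (List Int)) (out : Bool) : Decidable (Spec_est_triangle_rectangle points out) := by unfold Spec_est_triangle_rectangle; infer_instance

-- ===== CLAIM (what is proved, stated in full; the proofs are below) =====
def Claim_equal_est_triangle_rectangle : Prop := ∀ (points : List (List Int)), Dom_est_triangle_rectangle points → Pre_est_triangle_rectangle points → Spec_est_triangle_rectangle points (est_triangle_rectangle points)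

-- ===== LEMMAS AND PROOFS =====

-- set(xs) has at most as many elements as xs
theorem pv_ofList_length_le {α : Type} [BEq α] (xs : List α) :
    (PySem.Set.ofList xs).length ≤ xs.length := by
  rw [PySem.Set.ofList_eq_foldl]
  induction xs using List.reverseRecOn with
  | nil => simp
  | append_singleton xs x ih =>
    rw [List.foldl_append]
    simp only [List.foldl_cons, List.foldl_nil, PySem.Set.add, List.length_append]
    split <;> simp <;> omega

-- A's sorted Pythagorean check on three nonnegative ints ↔ some pairing sums to the third
theorem pv_sorted3 (a b c : Int) (ha : 0 ≤ a) (hb : 0 ≤ b) (hc : 0 ≤ c) :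
    (PySem.List.pyGetD (PySem.List.sorted [a, b, c] (fun x => x) false) 0 0
      + PySem.List.pyGetD (PySem.List.sorted [a, b, c] (fun x => x) false) 1 0
      = PySem.List.pyGetD (PySem.List.sorted [a, b, c] (fun x => x) false) 2 0)
    ↔ (a + b = c ∨ b + c = a ∨ a + c = b) := by
  rw [PySem.List.sorted_eq_foldl_insertBy]
  simp only [List.foldl_cons, List.foldl_nil, PySem.List.insertBy]
  split_ifs <;> (try simp only [PySem.List.insertBy]) <;> (try split_ifs) <;>
    simp_all [PySem.List.pyGetD, PySem.List.pyGet?, PySem.List.pyIdx?] <;> omega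

-- the law of cosines identities: each Pythagorean pairing ↔ a zero dot product at a vertex
theorem pv_key1 (x0 y0 x1 y1 x2 y2 : Int) :
    ((x0 - x1) ^ 2 + (y0 - y1) ^ 2) + ((x1 - x2) ^ 2 + (y1 - y2) ^ 2) = ((x0 - x2) ^ 2 + (y0 - y2) ^ 2)
    ↔ (x0 - x1) * (x2 - x1) + (y0 - y1) * (y2 - y1) = 0 := by
  constructor <;> intro h <;> nlinarith [h]

theorem pv_key2 (x0 y0 x1 y1 x2 y2 : Int) :
    ((x1 - x2) ^ 2 + (y1 - y2) ^ 2) + ((x0 - x2) ^ 2 + (y0 - y2) ^ 2) = ((x0 - x1) ^ 2 + (y0 - y1) ^ 2)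
    ↔ (x0 - x2) * (x1 - x2) + (y0 - y2) * (y1 - y2) = 0 := by
  constructor <;> intro h <;> nlinarith [h]

theorem pv_key0 (x0 y0 x1 y1 x2 y2 : Int) :
    ((x0 - x1) ^ 2 + (y0 - y1) ^ 2) + ((x0 - x2) ^ 2 + (y0 - y2) ^ 2) = ((x1 - x2) ^ 2 + (y1 - y2) ^ 2)
    ↔ (x1 - x0) * (x2 - x0) + (y1 - y0) * (y2 - y0) = 0 := by
  constructor <;> intro h <;> nlinarith [h]

theorem pv_get1 {α : Type} (a b : α) (r : List α) (d : α) :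
    PySem.List.pyGetD (a :: b :: r) 1 d = b := by
  simp [PySem.List.pyGetD, PySem.List.pyGet?, PySem.List.pyIdx?]

theorem pv_get2 {α : Type} (a b c : α) (r : List α) (d : α) :
    PySem.List.pyGetD (a :: b :: c :: r) 2 d = c := by
  simp [PySem.List.pyGetD, PySem.List.pyGet?, PySem.List.pyIdx?]
  split <;> simp_all <;> omega

-- ===== VERDICT (by name: the statement is the Claim_ definition above) =====
theorem est_triangle_rectangle_spec : Claim_equal_est_triangle_rectangle := by
  intro points _ hpre
  unfold Spec_est_triangle_rectangle est_triangle_rectangle est_triangle_rectangle_alt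
  by_cases h : (PySem.Set.ofList points).length = 3
  · obtain ⟨hl0, hl1, hl2⟩ := hpre h
    obtain ⟨p0, p1, p2, rest, rfl⟩ : ∃ p0 p1 p2 rest, points = p0 :: p1 :: p2 :: rest := by
      have hle := pv_ofList_length_le points
      rw [h] at hle
      match points, hle with
      | [], hle => simp at hle
      | [_], hle => simp at hle
      | [_, _], hle => simp at hle
      | p0 :: p1 :: p2 :: rest, _ => exact ⟨p0, p1, p2, rest, rfl⟩
    simp only [List.getD, List.getElem?_cons_zero, List.getElem?_cons_succ, Option.getD_some] at hl0 hl1 hl2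
    obtain ⟨x0, y0, t0, rfl⟩ : ∃ x y t, p0 = x :: y :: t := by
      match p0, hl0 with
      | x :: y :: t, _ => exact ⟨x, y, t, rfl⟩
    obtain ⟨x1, y1, t1, rfl⟩ : ∃ x y t, p1 = x :: y :: t := by
      match p1, hl1 with
      | x :: y :: t, _ => exact ⟨x, y, t, rfl⟩
    obtain ⟨x2, y2, t2, rfl⟩ : ∃ x y t, p2 = x :: y :: t := by
      match p2, hl2 with
      | x :: y :: t, _ => exact ⟨x, y, t, rfl⟩
    simp only [h, ne_eq, not_true_eq_false, if_false, List.any_cons, List.any_nil,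
      pvDotAt, pvDist, PySem.List.pyGetD_zero_cons, pv_get1, pv_get2, Bool.or_false]
    have hs := pv_sorted3
      ((x0 - x1) ^ 2 + (y0 - y1) ^ 2) ((x1 - x2) ^ 2 + (y1 - y2) ^ 2) ((x0 - x2) ^ 2 + (y0 - y2) ^ 2)
      (by positivity) (by positivity) (by positivity)
    simp only [hs, pv_key0, pv_key1, pv_key2]
    split_ifs with hd <;> symm <;>
      simp only [Bool.or_eq_true, beq_iff_eq, Bool.or_eq_false_iff, beq_eq_false_iff_ne, ne_eq] <;>
      tauto
  · rw [if_pos (by simpa using h), if_pos (by simpa using h)]
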